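-- pv_equiv track=rewrite | github.com/Leo22hung/bai_cuoi_ki | cuối kì/chương 2/bài9.py | mang_TrungCot
-- ===== SOURCE A (Python) =====
-- def mang_TrungCot(matrix):
--     rows = len(matrix)
--     cols = len(matrix[0])
--
--     # Tạo một từ điển để lưu trữ chỉ mục cột của các cột giống nhau
--     groups = {}
--
--     # Kiểm tra từng cặp cột trong ma trận
--     for j in range(cols):
--         col_content = tuple(matrix[i][j] for i in range(rows))  # Chuyển cột thành tuple để so sánh
--         if col_content in groups:
--             groups[col_content].append(j)  # Nếu cột đã xuất hiện, thêm chỉ mục cột vào nhóm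
--         else:
--             groups[col_content] = [j]  # Nếu cột chưa xuất hiện, tạo một nhóm mới
--
--     # In ra nhóm chỉ mục cột của các cột giống nhau
--     for group in groups.values():
--         if len(group) > 1:  # Nếu có ít nhất hai cột giống nhau, trả về True
--             return True
--     return False  # Nếu không tìm thấy hai cột giống nhau, trả về False
-- ===== SOURCE B (Python) =====
-- def mang_TrungCot(matrix):
--     rows = len(matrix)
--     cols = len(matrix[0])
--     cols_list = [tuple(matrix[i][j] for i in range(rows)) for j in range(cols)]
--     for j in range(cols):
--         for k in range(j + 1, cols):
--             if cols_list[j] == cols_list[k]: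
--                 return True
--     return False
-- ===== Notes on version B (the rewrite author's own statement) =====
-- stated objective: alternative
-- what changed: Replaces the dict-grouping of column tuples (then scanning group sizes) by materializing the columns once and directly comparing all pairs j<k with early exit.
import Mathlib
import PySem

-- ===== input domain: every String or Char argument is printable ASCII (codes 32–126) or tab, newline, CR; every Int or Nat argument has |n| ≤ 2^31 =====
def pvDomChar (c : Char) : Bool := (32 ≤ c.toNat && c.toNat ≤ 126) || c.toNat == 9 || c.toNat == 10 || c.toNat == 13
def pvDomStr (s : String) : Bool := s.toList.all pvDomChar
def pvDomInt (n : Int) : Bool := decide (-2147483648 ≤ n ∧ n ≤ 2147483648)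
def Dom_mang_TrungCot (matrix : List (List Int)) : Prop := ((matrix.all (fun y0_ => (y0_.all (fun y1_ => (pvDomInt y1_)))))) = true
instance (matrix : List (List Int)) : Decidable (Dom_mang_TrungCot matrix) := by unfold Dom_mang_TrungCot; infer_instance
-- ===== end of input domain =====

-- B replaces A's dict-grouping of column tuples by a direct pairwise comparison of materialized columns (alternative decomposition, same results).


-- ===== PORT A =====
def mang_TrungCot (matrix : List (List Int)) : Bool :=
  let rows : Int := matrix.length
  let cols : Int := ((PySem.List.pyGet? matrix 0).getD []).length
  let groups : PySem.Dict (List Int) (List Int) :=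
    (PySem.List.pyRange 0 cols 1).foldl (fun g j =>
      let colContent : List Int :=
        (PySem.List.pyRange 0 rows 1).map
          (fun i => PySem.List.pyGetD (PySem.List.pyGetD matrix i []) j 0)
      if g.contains colContent then
        g.insert colContent (g.getD colContent [] ++ [j])   -- groups[col_content].append(j)
      else
        g.insert colContent [j]                             -- groups[col_content] = [j]
    ) PySem.Dict.empty
  groups.values.any (fun group => group.length > 1)

-- ===== PORT B =====
def mang_TrungCot_alt (matrix : List (List Int)) : Bool :=
  let rows : Int := matrix.length
  let cols : Int := ((PySem.List.pyGet? matrix 0).getD []).length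
  let colsList : List (List Int) :=
    (PySem.List.pyRange 0 cols 1).map (fun j =>
      (PySem.List.pyRange 0 rows 1).map
        (fun i => PySem.List.pyGetD (PySem.List.pyGetD matrix i []) j 0))
  (PySem.List.pyRange 0 cols 1).any (fun j =>
    (PySem.List.pyRange (j + 1) cols 1).any (fun k =>
      PySem.List.pyGetD colsList j [] == PySem.List.pyGetD colsList k []))

-- ===== PRECONDITION & SPEC =====
-- Pre_ excludes exactly the inputs on which Python A raises IndexError: the empty matrix
-- (matrix[0]) and ragged matrices with some row shorter than row 0 (matrix[i][j]).
def Pre_mang_TrungCot (matrix : List (List Int)) : Prop :=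
  matrix ≠ [] ∧ ∀ row ∈ matrix, (matrix.headD []).length ≤ row.length
instance (matrix : List (List Int)) : Decidable (Pre_mang_TrungCot matrix) := by
  unfold Pre_mang_TrungCot; infer_instance

def pvWitness_mang_TrungCot : List (List Int) := [[1, 2], [3, 4]]

def Spec_mang_TrungCot (matrix : List (List Int)) (out : Bool) : Prop := out = mang_TrungCot_alt matrix
instance (matrix : List (List Int)) (out : Bool) : Decidable (Spec_mang_TrungCot matrix out) := by unfold Spec_mang_TrungCot; infer_instance

-- ===== CLAIM (what is proved, stated in full; the proofs are below) =====
def Claim_equal_mang_TrungCot : Prop := ∀ (matrix : List (List Int)), Dom_mang_TrungCot matrix → Pre_mang_TrungCot matrix → Spec_mang_TrungCot matrix (mang_TrungCot matrix)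

-- ===== LEMMAS AND PROOFS =====

-- the column extraction both ports perform, and the list of all columns
def pvCol (matrix : List (List Int)) (j : Int) : List Int :=
  (PySem.List.pyRange 0 (matrix.length : Int) 1).map
    (fun i => PySem.List.pyGetD (PySem.List.pyGetD matrix i []) j 0)

def pvCols (matrix : List (List Int)) : Int := ((PySem.List.pyGet? matrix 0).getD []).length

def pvColsList (matrix : List (List Int)) : List (List Int) :=
  (PySem.List.pyRange 0 (pvCols matrix) 1).map (pvCol matrix)

-- A's loop body (lookup-then-branch insert) is exactly Dict.modify
lemma pv_branch_eq {κ : Type} [BEq κ] [LawfulBEq κ] (d : PySem.Dict κ (List Int)) (k : κ) (j : Int) :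
    (if d.contains k then d.insert k (d.getD k [] ++ [j]) else d.insert k [j]) = d.modify k [] (· ++ [j]) := by
  by_cases h : d.contains k
  · simp [h, PySem.Dict.modify]
  · have h' : d.contains k = false := by simpa using h
    simp [h, PySem.Dict.modify, PySem.Dict.getD_of_not_contains d [] h']

-- A returns true iff the list of columns has a duplicate
lemma pv_A_iff (m : List (List Int)) :
    mang_TrungCot m = true ↔ ¬ (pvColsList m).Nodup := by
  have hstep := PySem.List.foldl_congr_mem (PySem.List.pyRange 0 (pvCols m) 1)
    (fun (g : PySem.Dict (List Int) (List Int)) j =>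
      if g.contains (pvCol m j) then
        g.insert (pvCol m j) (g.getD (pvCol m j) [] ++ [j])
      else
        g.insert (pvCol m j) [j])
    (fun g j => g.modify (pvCol m j) [] (· ++ [j])) PySem.Dict.empty
    (fun acc x _ => pv_branch_eq acc (pvCol m x) x)
  show ((PySem.List.pyRange 0 (pvCols m) 1).foldl (fun g j =>
      if g.contains (pvCol m j) then
        g.insert (pvCol m j) (g.getD (pvCol m j) [] ++ [j])
      else
        g.insert (pvCol m j) [j]) PySem.Dict.empty).values.any (fun group => group.length > 1) = true
      ↔ ¬ (pvColsList m).Nodup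
  rw [hstep]
  set L := PySem.List.pyRange 0 (pvCols m) 1 with hL
  set D := (L.foldl (fun g j => g.modify (pvCol m j) [] (· ++ [j])) PySem.Dict.empty) with hD
  have hkeys : D.keys = PySem.Set.ofList (pvColsList m) := by
    rw [hD, PySem.Dict.keys_foldl_modify_key L (pvCol m) [] (fun _ x => (· ++ [x])) PySem.Dict.empty,
        PySem.Dict.keys_empty, PySem.Set.update_nil_left]
    rfl
  have hnodup : D.keys.Nodup := by
    rw [hkeys]; exact PySem.Set.nodup_ofList _
  have hgetD : ∀ c, D.getD c [] = ((L.map (fun j => (pvCol m j, j))).filter (fun p => p.1 == c)).map (·.2) := by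
    intro c
    rw [hD, show (L.foldl (fun g j => g.modify (pvCol m j) [] (· ++ [j])) PySem.Dict.empty)
        = ((L.map (fun j => (pvCol m j, j))).foldl (fun d p => d.modify p.1 [] (· ++ [p.2])) PySem.Dict.empty)
      from (List.foldl_map (f := fun j => (pvCol m j, j))
        (g := fun (d : PySem.Dict (List Int) (List Int)) p => d.modify p.1 [] (· ++ [p.2]))
        (l := L) (init := PySem.Dict.empty)).symm]
    rw [PySem.Dict.getD_foldl_modify_append]
    simp
  have hlen : ∀ c, (D.getD c []).length = (pvColsList m).count c := by
    intro c
    rw [hgetD c, List.length_map, ← List.countP_eq_length_filter, List.countP_map,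
        pvColsList, List.count_eq_countP, List.countP_map, ← hL]
    rfl
  rw [PySem.Dict.values_eq_map_keys D hnodup [], List.any_map, List.any_eq_true]
  constructor
  · rintro ⟨c, hc, hp⟩
    simp only [Function.comp, hlen c, decide_eq_true_eq] at hp
    rw [List.nodup_iff_count_le_one]
    push_neg
    exact ⟨c, by omega⟩
  · intro hnd
    rw [List.nodup_iff_count_le_one] at hnd
    push_neg at hnd
    obtain ⟨c, hc⟩ := hnd
    refine ⟨c, ?_, ?_⟩
    · rw [hkeys]
      rw [PySem.Set.mem_ofList]
      exact List.count_pos_iff.mp (by omega)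
    · simp only [Function.comp, hlen c, decide_eq_true_eq]
      omega

-- B returns true iff the list of columns has a duplicate
lemma pv_B_iff (m : List (List Int)) :
    mang_TrungCot_alt m = true ↔ ¬ (pvColsList m).Nodup := by
  show ((PySem.List.pyRange 0 (pvCols m) 1).any (fun j =>
    (PySem.List.pyRange (j + 1) (pvCols m) 1).any (fun k =>
      PySem.List.pyGetD (pvColsList m) j [] == PySem.List.pyGetD (pvColsList m) k []))) = true
    ↔ ¬ (pvColsList m).Nodup
  simp only [List.any_eq_true, PySem.List.mem_pyRange_one]
  have hlen : (pvColsList m).length = (pvCols m).toNat := by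
    rw [pvColsList, List.length_map, PySem.List.length_pyRange_one]
    simp
  have hget : ∀ (i : Nat) (h : i < (pvColsList m).length), (pvColsList m)[i] = pvCol m i := by
    intro i h
    simp only [pvColsList] at h ⊢
    rw [List.getElem_map, PySem.List.getElem_pyRange_one]
    simp
  have hc0 : (0:Int) ≤ pvCols m := Int.natCast_nonneg _
  constructor
  · rintro ⟨j, ⟨hj0, hjc⟩, k, ⟨hk1, hkc⟩, hbeq⟩
    simp only [pvColsList] at hbeq
    rw [PySem.List.pyGetD_map_pyRange_of_nonneg _ _ _ _ hj0 hjc,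
        PySem.List.pyGetD_map_pyRange_of_nonneg _ _ _ _ (by omega) hkc] at hbeq
    rw [beq_iff_eq] at hbeq
    rw [List.Nodup, List.pairwise_iff_getElem]
    push_neg
    refine ⟨j.toNat, k.toNat, by rw [hlen]; omega, by rw [hlen]; omega, by omega, ?_⟩
    rw [hget _ (by rw [hlen]; omega), hget _ (by rw [hlen]; omega),
        Int.toNat_of_nonneg hj0, Int.toNat_of_nonneg (by omega)]
    exact hbeq
  · intro hnd
    rw [List.Nodup, List.pairwise_iff_getElem] at hnd
    push_neg at hnd
    obtain ⟨i, j, hi, hj, hij, heq⟩ := hnd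
    rw [hget _ hi, hget _ hj] at heq
    rw [hlen] at hi hj
    refine ⟨(i : Int), ⟨by omega, by omega⟩, (j : Int), ⟨by omega, by omega⟩, ?_⟩
    simp only [pvColsList]
    rw [PySem.List.pyGetD_map_pyRange_of_nonneg _ _ _ _ (by omega) (by omega),
        PySem.List.pyGetD_map_pyRange_of_nonneg _ _ _ _ (by omega) (by omega), beq_iff_eq]
    exact heq

-- ===== VERDICT (by name: the statement is the Claim_ definition above) =====
theorem mang_TrungCot_spec : Claim_equal_mang_TrungCot := by
  intro matrix _ _
  unfold Spec_mang_TrungCot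
  rw [Bool.eq_iff_iff, pv_A_iff, pv_B_iff]
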